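-- pv_equiv track=rewrite | github.com/als-computing/arroyosas | src/arroyogisaxs/tiled.py | unsent_frame_numbers
-- ===== SOURCE A (Python) =====
-- def unsent_frame_numbers(sent_frames: list, num_frames: int):
--     if len(sent_frames) == 0:
--         return list(range(num_frames))
--     # Find the gaps in my_list
--     gaps = [
--         i for i in range(min(sent_frames), max(sent_frames) + 1) if i not in sent_frames
--     ]
--
--     # Find numbers between new_number and the max of my_list
--     extra_numbers = list(range(max(sent_frames) + 1, num_frames + 1))
--
--     # Combine both lists
--     return gaps + extra_numbers
-- ===== SOURCE B (Python) =====
-- def unsent_frame_numbers(sent_frames: list, num_frames: int):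
--     if len(sent_frames) == 0:
--         return list(range(num_frames))
--     s = sorted(set(sent_frames))
--     out = []
--     for prev, nxt in zip(s, s[1:]):
--         out.extend(range(prev + 1, nxt))
--     out.extend(range(s[-1] + 1, num_frames + 1))
--     return out
-- ===== Notes on version B (the rewrite author's own statement) =====
-- stated objective: faster
-- what changed: Instead of enumerating every candidate number and testing each for membership in sent_frames (A's quadratic gaps filter plus a concatenated extra range), B sorts the distinct sent frames once and walks adjacent pairs, emitting the missing run between each consecutive pair and then the tail run up to num_frames; no membership test over the candidate range is performed at all.
import Mathlib
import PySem

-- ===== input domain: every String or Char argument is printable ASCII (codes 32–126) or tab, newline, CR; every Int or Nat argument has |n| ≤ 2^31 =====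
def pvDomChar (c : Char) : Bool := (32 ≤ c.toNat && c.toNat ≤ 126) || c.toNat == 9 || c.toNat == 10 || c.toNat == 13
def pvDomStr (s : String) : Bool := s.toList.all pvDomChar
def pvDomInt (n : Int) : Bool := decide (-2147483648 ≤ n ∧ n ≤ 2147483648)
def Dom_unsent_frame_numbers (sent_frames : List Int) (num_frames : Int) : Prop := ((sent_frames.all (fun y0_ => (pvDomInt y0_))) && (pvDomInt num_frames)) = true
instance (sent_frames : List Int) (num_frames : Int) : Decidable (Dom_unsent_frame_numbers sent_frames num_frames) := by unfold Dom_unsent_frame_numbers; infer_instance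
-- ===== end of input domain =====

-- B sorts the distinct sent frames once and emits the missing runs between consecutive
-- sent values plus the tail run, replacing A's membership-filtered candidate range (objective: faster).

-- ===== PORT A =====
def unsent_frame_numbers (sent_frames : List Int) (num_frames : Int) : List Int :=
  if sent_frames.length == 0 then PySem.List.pyRange 0 num_frames 1
  else
    let mn := (PySem.List.min? sent_frames (fun x => x)).getD 0
    let mx := (PySem.List.max? sent_frames (fun x => x)).getD 0
    let gaps := (PySem.List.pyRange mn (mx + 1) 1).filter (fun i => !sent_frames.contains i)
    let extra := PySem.List.pyRange (mx + 1) (num_frames + 1) 1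
    gaps ++ extra

-- ===== PORT B =====
def unsent_frame_numbers_alt (sent_frames : List Int) (num_frames : Int) : List Int :=
  if sent_frames.length == 0 then PySem.List.pyRange 0 num_frames 1
  else
    let s := PySem.List.sorted (PySem.Set.ofList sent_frames) (fun x => x) false
    -- for prev, nxt in zip(s, s[1:]): out.extend(range(prev+1, nxt))
    let out := (s.zip (s.drop 1)).foldl
      (fun out p => out ++ PySem.List.pyRange (p.1 + 1) p.2 1) []
    -- s[-1]: s is nonempty here (sent_frames ≠ []), so pyGet? returns some
    out ++ PySem.List.pyRange (((PySem.List.pyGet? s (-1)).getD 0) + 1) (num_frames + 1) 1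

-- ===== PRECONDITION & SPEC =====
def Spec_unsent_frame_numbers (sent_frames : List Int) (num_frames : Int) (out : List Int) : Prop := out = unsent_frame_numbers_alt sent_frames num_frames
instance (sent_frames : List Int) (num_frames : Int) (out : List Int) : Decidable (Spec_unsent_frame_numbers sent_frames num_frames out) := by unfold Spec_unsent_frame_numbers; infer_instance

-- ===== CLAIM =====
def Claim_equal_unsent_frame_numbers : Prop := ∀ (sent_frames : List Int) (num_frames : Int), Dom_unsent_frame_numbers sent_frames num_frames → Spec_unsent_frame_numbers sent_frames num_frames (unsent_frame_numbers sent_frames num_frames)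

-- ===== LEMMAS AND PROOFS =====

-- on a strictly increasing nonempty list, all elements lie between head and getLast
theorem head_le_of_pairwise_lt (a : Int) (t : List Int)
    (h : (a :: t).Pairwise (· < ·)) : ∀ y ∈ a :: t, a ≤ y := by
  intro y hy
  rcases List.mem_cons.mp hy with rfl | hy
  · exact le_refl _
  · exact le_of_lt ((List.pairwise_cons.mp h).1 y hy)

theorem le_getLast_of_pairwise_lt (a : Int) (t : List Int)
    (h : (a :: t).Pairwise (· < ·)) :
    ∀ y ∈ a :: t, y ≤ (a :: t).getLast (by simp) := by
  induction t generalizing a with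
  | nil => intro y hy; simp_all
  | cons b t' ih =>
    intro y hy
    have h' : (b :: t').Pairwise (· < ·) := (List.pairwise_cons.mp h).2
    have hlast : ((a :: b :: t').getLast (by simp)) = ((b :: t').getLast (by simp)) := by
      simp [List.getLast]
    rw [hlast]
    rcases List.mem_cons.mp hy with rfl | hy
    · exact le_trans (le_of_lt ((List.pairwise_cons.mp h).1 b (by simp)))
        (ih b h' b (by simp))
    · exact ih b h' y hy

-- the gap walk over consecutive pairs equals the membership-filtered range from head to getLast
theorem gaps_eq (t : List Int) : ∀ (a : Int), (a :: t).Pairwise (· < ·) →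
    ((a :: t).zip t).flatMap (fun p => PySem.List.pyRange (p.1 + 1) p.2 1)
      = (PySem.List.pyRange a ((a :: t).getLast (by simp) + 1) 1).filter
          (fun i => !(a :: t).contains i) := by
  induction t with
  | nil =>
    intro a _
    simp [PySem.List.pyRange_one_singleton, List.filter]
  | cons b t' ih =>
    intro a h
    have hab : a < b := (List.pairwise_cons.mp h).1 b (by simp)
    have h' : (b :: t').Pairwise (· < ·) := (List.pairwise_cons.mp h).2
    have hbl : b ≤ (b :: t').getLast (by simp) :=
      le_getLast_of_pairwise_lt b t' h' b (by simp)
    have hlast : ((a :: b :: t').getLast (by simp)) = ((b :: t').getLast (by simp)) := by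
      simp [List.getLast]
    -- split the RHS range at b
    rw [hlast, PySem.List.pyRange_one_append a b ((b :: t').getLast (by simp) + 1)
      (le_of_lt hab) (by omega), List.filter_append]
    -- left part: [a] ++ (a+1..b); a is filtered out, the open interval is kept whole
    have hleft : (PySem.List.pyRange a b 1).filter (fun i => !(a :: b :: t').contains i)
        = PySem.List.pyRange (a + 1) b 1 := by
      have hfa : (!(a :: b :: t').contains a) = false := by simp
      rw [PySem.List.pyRange_one_cons hab, List.filter_cons, hfa, if_neg (by simp),
        List.filter_eq_self]
      intro y hy
      have hy' := PySem.List.mem_pyRange_one.mp hy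
      simp only [Bool.not_eq_eq_eq_not, Bool.not_true, List.contains_eq_mem,
        decide_eq_false_iff_not]
      intro hmem
      rcases List.mem_cons.mp hmem with rfl | hmem
      · omega
      · have := head_le_of_pairwise_lt b t' h' y hmem; omega
    -- right part: elements are ≥ b > a, so membership in a :: rest = membership in rest
    have hright : (PySem.List.pyRange b ((b :: t').getLast (by simp) + 1) 1).filter
          (fun i => !(a :: b :: t').contains i)
        = (PySem.List.pyRange b ((b :: t').getLast (by simp) + 1) 1).filter
          (fun i => !(b :: t').contains i) := by
      apply List.filter_congr
      intro y hy
      have hy' := PySem.List.mem_pyRange_one.mp hy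
      simp only [List.contains_cons]
      have : (y == a) = false := by simp; omega
      rw [this]; simp
    rw [hleft, hright, ← ih b h']
    simp [List.zip]

theorem unsent_main (sent_frames : List Int) (num_frames : Int) :
    unsent_frame_numbers sent_frames num_frames = unsent_frame_numbers_alt sent_frames num_frames := by
  unfold unsent_frame_numbers unsent_frame_numbers_alt
  rcases sent_frames with _ | ⟨x, t⟩
  · rfl
  · simp only [List.length_cons, beq_iff_eq, Nat.succ_ne_zero, if_false]
    have hpw : (PySem.List.sorted (PySem.Set.ofList (x :: t)) (fun y => y) false).Pairwise (· < ·) :=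
      PySem.List.sorted_ofList_pairwise_lt (x :: t)
    have hmem : ∀ y, y ∈ PySem.List.sorted (PySem.Set.ofList (x :: t)) (fun y => y) false ↔ y ∈ x :: t := by
      intro y
      rw [PySem.List.mem_sorted, PySem.Set.mem_ofList]
    obtain ⟨a, u, hse⟩ : ∃ a u, PySem.List.sorted (PySem.Set.ofList (x :: t)) (fun y => y) false = a :: u := by
      cases hc : PySem.List.sorted (PySem.Set.ofList (x :: t)) (fun y => y) false with
      | nil => exact absurd ((hmem x).mpr (by simp)) (by simp [hc])
      | cons a u => exact ⟨a, u, rfl⟩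
    rw [hse] at hpw hmem
    rw [hse]
    have hminS : (PySem.List.min? (x :: t) (fun y => y)) = some (t.foldl min x) :=
      PySem.List.min?_id_cons x t
    have hmaxS : (PySem.List.max? (x :: t) (fun y => y)) = some (t.foldl max x) :=
      PySem.List.max?_id_cons x t
    have hmn_mem : t.foldl min x ∈ x :: t := PySem.List.min?_mem hminS
    have hmx_mem : t.foldl max x ∈ x :: t := PySem.List.max?_mem hmaxS
    have hhead : a = t.foldl min x := by
      have h1 : t.foldl min x ≤ a := PySem.List.min?_isMin hminS a ((hmem a).mp (by simp))
      have h2 : a ≤ t.foldl min x :=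
        head_le_of_pairwise_lt a u hpw _ ((hmem _).mpr hmn_mem)
      omega
    have hlastL : (a :: u).getLast (by simp) = t.foldl max x := by
      have h1 : (a :: u).getLast (by simp) ≤ t.foldl max x :=
        PySem.List.max?_isMax hmaxS _ ((hmem _).mp (List.getLast_mem (by simp)))
      have h2 : t.foldl max x ≤ (a :: u).getLast (by simp) :=
        le_getLast_of_pairwise_lt a u hpw _ ((hmem _).mpr hmx_mem)
      omega
    have hneg : ((PySem.List.pyGet? (a :: u) (-1)).getD 0) = (a :: u).getLast (by simp) := by
      simp [PySem.List.pyGet?, PySem.List.pyIdx?]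
      rw [List.getLast_eq_getElem]
      norm_num
      rfl
    have hfold : ((a :: u).zip ((a :: u).drop 1)).foldl
        (fun out p => out ++ PySem.List.pyRange (p.1 + 1) p.2 1) []
        = ((a :: u).zip u).flatMap (fun p => PySem.List.pyRange (p.1 + 1) p.2 1) := by
      rw [PySem.List.foldl_append_eq_flatMap]
      simp
    simp only [hminS, hmaxS, Option.getD_some]
    rw [hfold, gaps_eq u a hpw, hneg, hlastL, hhead]
    congr 1
    apply List.filter_congr
    intro y _
    simp only [Bool.not_inj_iff, List.contains_eq_mem, decide_eq_decide]
    rw [← hhead]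
    exact (hmem y).symm

-- ===== VERDICT =====
theorem unsent_frame_numbers_spec : Claim_equal_unsent_frame_numbers := by
  intro sf nf _
  exact unsent_main sf nf
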